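-- pv_equiv track=rewrite | github.com/fragiacalone/project_20_newsgroup | extract_features.py | get_perturbated
-- ===== SOURCE A (Python) =====
-- def get_perturbated(sentences, labelled):
--     perturbated = {}
--     features = {}
--     lablist = list(set(labelled.values()))
--     for label in lablist:
--         ptext = ''
--         ftext = ''
--         for sentence in sentences:
--             if labelled[sentence] != label:
--                 ptext = ptext + ' ' + sentence
--             else: ftext = ftext + ' ' + sentence
--         perturbated[label] = ptext
--         features[label] = ftext
--     return [perturbated, features]
-- ===== SOURCE B (Python) =====
-- def get_perturbated(sentences, labelled):
--     lablist = list(set(labelled.values()))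
--     perturbated = {label: '' for label in lablist}
--     features = {label: '' for label in lablist}
--     if lablist:
--         for sentence in sentences:
--             s_label = labelled[sentence]
--             features[s_label] = features[s_label] + ' ' + sentence
--             for label in lablist:
--                 if label != s_label:
--                     perturbated[label] = perturbated[label] + ' ' + sentence
--     return [perturbated, features]
-- ===== Notes on version B (the rewrite author's own statement) =====
-- stated objective: alternative
-- what changed: Inverts the loop nesting: instead of rescanning all sentences once per label, B pre-seeds both dicts with empty strings and (when any labels exist) makes a single pass over the sentences, looking each sentence's label up once, appending it to its own features entry and to every other label's perturbated entry.
import Mathlib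
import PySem

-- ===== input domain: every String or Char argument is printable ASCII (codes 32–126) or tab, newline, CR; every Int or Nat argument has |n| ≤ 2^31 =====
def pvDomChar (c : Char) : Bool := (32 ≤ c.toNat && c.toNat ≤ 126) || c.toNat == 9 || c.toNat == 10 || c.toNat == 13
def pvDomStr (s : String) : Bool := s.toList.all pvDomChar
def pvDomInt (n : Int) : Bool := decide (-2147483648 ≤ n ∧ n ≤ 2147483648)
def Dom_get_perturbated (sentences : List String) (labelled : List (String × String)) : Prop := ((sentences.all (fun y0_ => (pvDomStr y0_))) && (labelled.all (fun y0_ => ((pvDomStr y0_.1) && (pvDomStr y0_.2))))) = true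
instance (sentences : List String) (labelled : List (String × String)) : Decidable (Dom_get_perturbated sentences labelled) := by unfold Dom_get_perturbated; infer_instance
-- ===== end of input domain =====

-- B inverts A's loop nesting: one pass over the sentences into pre-seeded per-label dicts,
-- one label lookup per sentence, instead of one full scan of the sentences per label.

-- ===== PORT A =====
def get_perturbated (sentences : List String) (labelled : List (String × String)) : List (List (String × String)) :=
  let d := PySem.Dict.ofList labelled
  let lablist : List String := PySem.Set.ofList d.values
  let pf := lablist.foldl (fun (pf : PySem.Dict String String × PySem.Dict String String) label =>
      let tt := sentences.foldl (fun (tt : String × String) sentence =>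
          if d.getD sentence "" ≠ label then (tt.1 ++ " " ++ sentence, tt.2)
          else (tt.1, tt.2 ++ " " ++ sentence)) ("", "")
      (pf.1.insert label tt.1, pf.2.insert label tt.2))
    (PySem.Dict.empty, PySem.Dict.empty)
  [pf.1.items, pf.2.items]

-- ===== PORT B =====
def get_perturbated_alt (sentences : List String) (labelled : List (String × String)) : List (List (String × String)) :=
  let d := PySem.Dict.ofList labelled
  let lablist : List String := PySem.Set.ofList d.values
  let p0 : PySem.Dict String String := lablist.foldl (fun acc label => acc.insert label "") PySem.Dict.empty
  let f0 : PySem.Dict String String := lablist.foldl (fun acc label => acc.insert label "") PySem.Dict.empty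
  let pf := if lablist = [] then (p0, f0) else
    sentences.foldl (fun (pf : PySem.Dict String String × PySem.Dict String String) sentence =>
      let slab := d.getD sentence ""
      let fd := pf.2.modify slab "" (fun t => t ++ " " ++ sentence)
      let pd := lablist.foldl (fun pd label =>
          if label ≠ slab then pd.modify label "" (fun t => t ++ " " ++ sentence) else pd) pf.1
      (pd, fd)) (p0, f0)
  [pf.1.items, pf.2.items]

-- ===== PRECONDITION & SPEC =====
-- Pre_ excludes exactly the inputs where labelled is nonempty and some sentence is missing from it:
-- there A raises KeyError (and B raises KeyError too); when labelled is empty both return two empty dicts.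
def Pre_get_perturbated (sentences : List String) (labelled : List (String × String)) : Prop :=
  labelled ≠ [] → ∀ s ∈ sentences, (PySem.Dict.ofList labelled).contains s = true
instance (sentences : List String) (labelled : List (String × String)) : Decidable (Pre_get_perturbated sentences labelled) := by unfold Pre_get_perturbated; infer_instance
def pvWitness_get_perturbated : List String × (List (String × String)) :=
  (["a b", "c", "a b"], [("a b", "X"), ("c", "Y"), ("d", "X")])

def Spec_get_perturbated (sentences : List String) (labelled : List (String × String)) (out : List (List (String × String))) : Prop := out = get_perturbated_alt sentences labelled
instance (sentences : List String) (labelled : List (String × String)) (out : List (List (String × String))) : Decidable (Spec_get_perturbated sentences labelled out) := by unfold Spec_get_perturbated; infer_instance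

-- ===== CLAIM (what is proved, stated in full; the proofs are below) =====
def Claim_equal_get_perturbated : Prop := ∀ (sentences : List String) (labelled : List (String × String)), Dom_get_perturbated sentences labelled → Pre_get_perturbated sentences labelled → Spec_get_perturbated sentences labelled (get_perturbated sentences labelled)

-- ===== LEMMAS AND PROOFS =====

-- a foldl whose state is a pair updated componentwise splits into two foldls
theorem pv_foldl_pair {α β γ : Type} (l : List γ) (g1 : α → γ → α) (g2 : β → γ → β) (a : α) (b : β) :
    l.foldl (fun p x => (g1 p.1 x, g2 p.2 x)) (a, b) = (l.foldl g1 a, l.foldl g2 b) := by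
  induction l generalizing a b with
  | nil => rfl
  | cons x xs ih => simpa using ih (g1 a x) (g2 b x)

-- A's inner sentence loop, state (ptext, ftext), split into two string foldls
theorem pv_foldl_if_pair (l : List String) (c : String → Prop) [DecidablePred c] (a b : String) :
    l.foldl (fun (tt : String × String) s =>
        if c s then (tt.1 ++ " " ++ s, tt.2) else (tt.1, tt.2 ++ " " ++ s)) (a, b)
      = (l.foldl (fun t s => if c s then t ++ " " ++ s else t) a,
         l.foldl (fun t s => if c s then t else t ++ " " ++ s) b) := by
  induction l generalizing a b with
  | nil => rfl
  | cons x xs ih =>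
    by_cases h : c x <;> simp [List.foldl_cons, h, ih]

-- the pair split specialised to A's outer loop shape
theorem pv_a_split (lab : List String) (A1 A2 : String → String) (P Q : PySem.Dict String String) :
    lab.foldl (fun (pf : PySem.Dict String String × PySem.Dict String String) label =>
        (pf.1.insert label (A1 label), pf.2.insert label (A2 label))) (P, Q)
      = (lab.foldl (fun dd label => dd.insert label (A1 label)) P,
         lab.foldl (fun dd label => dd.insert label (A2 label)) Q) :=
  pv_foldl_pair lab (fun dd label => dd.insert label (A1 label))
    (fun dd label => dd.insert label (A2 label)) P Q

-- seeding a dict with '' for every key keeps every getD _ "" at ""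
theorem pv_getD_seed (lab : List String) (P : PySem.Dict String String)
    (h : ∀ l, P.getD l "" = "") (l : String) :
    (lab.foldl (fun acc x => acc.insert x "") P).getD l "" = "" := by
  induction lab generalizing P with
  | nil => exact h l
  | cons x xs ih =>
    refine ih _ (fun l' => ?_)
    rw [PySem.Dict.getD_insert]
    split <;> simp [h]

-- B's inner label loop: keys unchanged, every label except slab gets " " ++ t appended
theorem pv_inner_fold (js : List String) (hnd : js.Nodup) (slab t : String)
    (P : PySem.Dict String String) (hsub : ∀ x ∈ js, P.contains x = true) :
    ((js.foldl (fun pd label => if label ≠ slab then pd.modify label "" (fun x => x ++ " " ++ t) else pd) P).keys = P.keys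
     ∧ ∀ l, (js.foldl (fun pd label => if label ≠ slab then pd.modify label "" (fun x => x ++ " " ++ t) else pd) P).getD l ""
          = if l ∈ js ∧ l ≠ slab then P.getD l "" ++ " " ++ t else P.getD l "") := by
  induction js generalizing P with
  | nil => exact ⟨rfl, fun l => by simp⟩
  | cons j js ih =>
    have hjnd : js.Nodup := hnd.of_cons
    have hjmem : j ∉ js := by
      rw [List.nodup_cons] at hnd; exact hnd.1
    simp only [List.foldl_cons]
    by_cases hj : j ≠ slab
    · rw [if_pos hj]
      have hPj : P.contains j = true := hsub j (by simp)
      have hsub' : ∀ x ∈ js, (P.modify j "" (fun x => x ++ " " ++ t)).contains x = true := by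
        intro x hx
        rw [PySem.Dict.contains_modify]
        simp [hsub x (List.mem_cons_of_mem _ hx)]
      obtain ⟨k1, k2⟩ := ih hjnd _ hsub'
      refine ⟨?_, fun l => ?_⟩
      · rw [k1, PySem.Dict.keys_modify, PySem.Dict.keys_insert_of_contains _ _ hPj]
      · rw [k2 l, PySem.Dict.getD_modify]
        by_cases hlj : l = j
        · subst hlj
          simp [hjmem, hj]
        · simp [hlj]
    · rw [if_neg hj]
      have hj' : j = slab := not_not.mp hj
      obtain ⟨k1, k2⟩ := ih hjnd P (fun x hx => hsub x (List.mem_cons_of_mem _ hx))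
      refine ⟨k1, fun l => ?_⟩
      rw [k2 l]
      by_cases hls : l = slab
      · simp [hls]
      · simp [List.mem_cons, hls, hj']

-- B's per-sentence step (the zeta-reduced body of B's outer loop)
def pvBStep (lab : List String) (look : String → String)
    (pf : PySem.Dict String String × PySem.Dict String String) (s : String) :
    PySem.Dict String String × PySem.Dict String String :=
  (lab.foldl (fun pd label => if label ≠ look s then pd.modify label "" (fun t => t ++ " " ++ s) else pd) pf.1,
   pf.2.modify (look s) "" (fun t => t ++ " " ++ s))

-- B's outer sentence loop characterised on the keys of lab
theorem pv_b_fold (ss lab : List String) (hnd : lab.Nodup)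
    (look : String → String) (hmem : ∀ s ∈ ss, look s ∈ lab)
    (P F : PySem.Dict String String) (hPk : P.keys = lab) (hFk : F.keys = lab) :
    ((ss.foldl (pvBStep lab look) (P, F)).1.keys = lab
     ∧ (ss.foldl (pvBStep lab look) (P, F)).2.keys = lab
     ∧ (∀ l ∈ lab, (ss.foldl (pvBStep lab look) (P, F)).1.getD l ""
          = ss.foldl (fun t s => if look s ≠ l then t ++ " " ++ s else t) (P.getD l ""))
     ∧ (∀ l ∈ lab, (ss.foldl (pvBStep lab look) (P, F)).2.getD l ""
          = ss.foldl (fun t s => if look s ≠ l then t else t ++ " " ++ s) (F.getD l ""))) := by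
  induction ss generalizing P F with
  | nil => exact ⟨hPk, hFk, fun l _ => rfl, fun l _ => rfl⟩
  | cons s ss ih =>
    have hslab : look s ∈ lab := hmem s (by simp)
    have hsubP : ∀ x ∈ lab, P.contains x = true := fun x hx =>
      (PySem.Dict.contains_iff_mem_keys P x).mpr (hPk ▸ hx)
    obtain ⟨i1, i2⟩ := pv_inner_fold lab hnd (look s) s P hsubP
    have hF'k : (F.modify (look s) "" (fun t => t ++ " " ++ s)).keys = lab := by
      rw [PySem.Dict.keys_modify,
        PySem.Dict.keys_insert_of_contains _ _ ((PySem.Dict.contains_iff_mem_keys F _).mpr (hFk ▸ hslab))]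
      exact hFk
    obtain ⟨b1, b2, b3, b4⟩ := ih (fun x hx => hmem x (List.mem_cons_of_mem _ hx)) _ _ (i1.trans hPk) hF'k
    simp only [List.foldl_cons, pvBStep] at b1 b2 b3 b4 ⊢
    refine ⟨b1, b2, fun l hl => ?_, fun l hl => ?_⟩
    · rw [b3 l hl, i2 l]
      congr 1
      by_cases hls : look s ≠ l
      · rw [if_pos hls, if_pos ⟨hl, fun h => hls h.symm⟩]
      · rw [not_not.mp (show ¬¬ look s = l from fun h => hls h)] at *
        rw [if_neg (by simp), if_neg (by simp)]
    · rw [b4 l hl, PySem.Dict.getD_modify]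
      congr 1
      by_cases hls : look s = l
      · rw [hls, if_pos rfl, if_neg (by simp)]
      · rw [if_neg (fun h => hls h.symm), if_pos hls]

-- A's outer label loop: fresh distinct keys inserted into an empty dict append in order
theorem pv_a_items (lab : List String) (hnd : lab.Nodup) (u : String → String) :
    (lab.foldl (fun (dd : PySem.Dict String String) label => dd.insert label (u label)) PySem.Dict.empty).items
      = lab.map (fun l => (l, u l)) := by
  have h := PySem.Dict.items_foldl_insert_fresh lab (fun a => a) u PySem.Dict.empty
    (fun a _ => by simp) (by simpa using hnd)
  simpa using h

-- keys of the seeding loop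
theorem pv_seed_keys (lab : List String) (hnd : lab.Nodup) :
    (lab.foldl (fun (acc : PySem.Dict String String) label => acc.insert label "") PySem.Dict.empty).keys = lab := by
  have h := PySem.Dict.keys_foldl_insert lab (fun _ _ => ("" : String)) PySem.Dict.empty
  simp only [PySem.Dict.keys_empty, PySem.Set.update_nil_left] at h
  rw [h, PySem.Set.ofList_eq_self_of_nodup _ hnd]

-- ===== VERDICT (by name: the statement is the Claim_ definition above) =====
theorem get_perturbated_spec : Claim_equal_get_perturbated := by
  intro sentences labelled _ hpre
  unfold Spec_get_perturbated
  by_cases hl : (PySem.Set.ofList (PySem.Dict.ofList labelled).values : List String) = []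
  · -- no labels at all: A's outer loop and B's sentence pass both do nothing
    simp [get_perturbated, get_perturbated_alt, hl]
  · have hlne : labelled ≠ [] := fun h => hl (by subst h; rfl)
    have hpre' := hpre hlne
    have hnd : (PySem.Set.ofList (PySem.Dict.ofList labelled).values : List String).Nodup :=
      PySem.Set.nodup_ofList _
    set d := PySem.Dict.ofList labelled with hd
    set lab : List String := PySem.Set.ofList d.values with hlab
    have hmem : ∀ s ∈ sentences, d.getD s "" ∈ lab := by
      intro s hs
      have hc := hpre' s hs
      rw [PySem.Dict.contains_eq_isSome_get?] at hc
      obtain ⟨v, hv⟩ := Option.isSome_iff_exists.mp hc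
      rw [PySem.Dict.getD_of_get?_eq_some _ _ hv]
      have hit : (s, v) ∈ d.items := PySem.Dict.mem_items_of_get?_eq_some _ hv
      have hvv : v ∈ d.values := by
        simp only [PySem.Dict.values]
        exact List.mem_map_of_mem hit
      rw [hlab, PySem.Set.mem_ofList]
      exact hvv
    have hAeq : get_perturbated sentences labelled =
        [lab.map (fun l => (l, sentences.foldl (fun t s => if d.getD s "" ≠ l then t ++ " " ++ s else t) "")),
         lab.map (fun l => (l, sentences.foldl (fun t s => if d.getD s "" ≠ l then t else t ++ " " ++ s) ""))] := by
      simp only [get_perturbated, pv_foldl_if_pair, pv_a_split, ← hd, ← hlab]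
      rw [pv_a_items lab hnd, pv_a_items lab hnd]
    have hBeq : get_perturbated_alt sentences labelled =
        [(sentences.foldl (pvBStep lab (fun s => d.getD s ""))
            (lab.foldl (fun (acc : PySem.Dict String String) label => acc.insert label "") PySem.Dict.empty,
             lab.foldl (fun (acc : PySem.Dict String String) label => acc.insert label "") PySem.Dict.empty)).1.items,
         (sentences.foldl (pvBStep lab (fun s => d.getD s ""))
            (lab.foldl (fun (acc : PySem.Dict String String) label => acc.insert label "") PySem.Dict.empty,
             lab.foldl (fun (acc : PySem.Dict String String) label => acc.insert label "") PySem.Dict.empty)).2.items] := by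
      simp only [get_perturbated_alt, ← hd, ← hlab, if_neg hl]
      rfl
    obtain ⟨bk1, bk2, bg1, bg2⟩ := pv_b_fold sentences lab hnd (fun s => d.getD s "") hmem _ _
      (pv_seed_keys lab hnd) (pv_seed_keys lab hnd)
    rw [hAeq, hBeq]
    have e1 := PySem.Dict.items_eq_map_keys
      (sentences.foldl (pvBStep lab (fun s => d.getD s ""))
        (lab.foldl (fun (acc : PySem.Dict String String) label => acc.insert label "") PySem.Dict.empty,
         lab.foldl (fun (acc : PySem.Dict String String) label => acc.insert label "") PySem.Dict.empty)).1
      (by rw [bk1]; exact hnd) ""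
    have e2 := PySem.Dict.items_eq_map_keys
      (sentences.foldl (pvBStep lab (fun s => d.getD s ""))
        (lab.foldl (fun (acc : PySem.Dict String String) label => acc.insert label "") PySem.Dict.empty,
         lab.foldl (fun (acc : PySem.Dict String String) label => acc.insert label "") PySem.Dict.empty)).2
      (by rw [bk2]; exact hnd) ""
    rw [e1, e2, bk1, bk2]
    congr 1
    · apply List.map_congr_left
      intro l hl'
      rw [bg1 l hl', pv_getD_seed lab _ (fun l' => PySem.Dict.getD_empty l' "") l]
    · rw [List.cons.injEq]
      refine ⟨?_, rfl⟩
      apply List.map_congr_left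
      intro l hl'
      rw [bg2 l hl', pv_getD_seed lab _ (fun l' => PySem.Dict.getD_empty l' "") l]
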